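-- pv_equiv track=rewrite | github.com/spdmmwb/spd | carlier.py | cmax
-- ===== SOURCE A (Python) =====
-- def cmax(data, order):
--     time = sum(data[order[0]][:-1])
--     qk = [sum(data[order[0]][:-1]) + data[order[0]][2]]
--     for i in order[1:]:
--         if data[i][0] > time:
--             time = sum(data[i][:-1])
--             qk.append(time + data[i][2])
--         else:
--             time += data[i][1]
--             qk.append(time + data[i][2])
--     return max(qk)
-- ===== SOURCE B (Python) =====
-- def cmax(data, order):
--     # Divide and conquer over segments of `order`: a segment, given the machine time
--     # coming in from its left (None before the first job), yields the outgoing machine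
--     # time and the maximum completion time inside it; halves combine by threading the
--     # time and taking the max of the two bests.  Return value only; O(log n) depth.
--     def seg(lo, hi, t):
--         if hi - lo == 1:
--             row = data[order[lo]]
--             if t is None or row[0] > t:
--                 nt = sum(row[:-1])
--             else:
--                 nt = t + row[1]
--             return nt, nt + row[2]
--         mid = (lo + hi) // 2
--         t1, b1 = seg(lo, mid, t)
--         t2, b2 = seg(mid, hi, t1)
--         return t2, max(b1, b2)
--     if not order:
--         raise IndexError("order is empty")
--     return seg(0, len(order), None)[1]
-- ===== Notes on version B (the rewrite author's own statement) =====
-- stated objective: alternative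
-- what changed: Replaces A's linear left-to-right loop that builds a qk list and takes max(qk) with a divide-and-conquer recursion over segments of order: each segment maps its incoming machine time to (outgoing time, best completion), halves combine by threading the time and taking the max of the two bests.
import Mathlib
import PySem

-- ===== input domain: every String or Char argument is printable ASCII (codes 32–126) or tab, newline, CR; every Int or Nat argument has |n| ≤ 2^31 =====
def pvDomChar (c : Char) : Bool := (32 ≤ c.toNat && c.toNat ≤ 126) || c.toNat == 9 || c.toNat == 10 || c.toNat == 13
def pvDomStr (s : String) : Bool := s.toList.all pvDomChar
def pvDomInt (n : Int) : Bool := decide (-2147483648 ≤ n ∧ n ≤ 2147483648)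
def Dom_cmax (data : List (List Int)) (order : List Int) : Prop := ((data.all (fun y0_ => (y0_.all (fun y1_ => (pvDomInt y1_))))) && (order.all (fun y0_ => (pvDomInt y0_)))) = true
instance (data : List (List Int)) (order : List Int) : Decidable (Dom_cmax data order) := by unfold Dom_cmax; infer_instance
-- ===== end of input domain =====

-- B replaces A's linear loop (qk list then max(qk)) by a divide-and-conquer recursion over
-- segments of order, threading the machine time left-to-right and combining bests with max;
-- return value only.

-- ===== PORT A =====
-- shared indexing helper: data[i] (defaulted; Pre_ guarantees in range)
def pvRow (data : List (List Int)) (i : Int) : List Int := PySem.List.pyGetD data i []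

-- loop body of A: state (time, qk), Python append = ++ [·]
def cmaxStepA (data : List (List Int)) (s : Int × List Int) (i : Int) : Int × List Int :=
  let r := pvRow data i
  if PySem.List.pyGetD r 0 0 > s.1 then
    let t := (PySem.List.slice r none (some (-1))).sum
    (t, s.2 ++ [t + PySem.List.pyGetD r 2 0])
  else
    let t := s.1 + PySem.List.pyGetD r 1 0
    (t, s.2 ++ [t + PySem.List.pyGetD r 2 0])

def cmax (data : List (List Int)) (order : List Int) : Int :=
  let r0 := pvRow data (PySem.List.pyGetD order 0 0)
  let time := (PySem.List.slice r0 none (some (-1))).sum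
  let qk := [(PySem.List.slice r0 none (some (-1))).sum + PySem.List.pyGetD r0 2 0]
  let s := (PySem.List.slice order (some 1) none).foldl (cmaxStepA data) (time, qk)
  (PySem.List.max? s.2 (fun x => x)).getD 0

-- ===== PORT B =====
-- seg(lo, hi, t) of Source B: the segment order[lo:hi], given the incoming machine time t
-- (none before the first job), returns (outgoing machine time, best completion inside).
-- The `lo < hi` guard only makes the unreachable empty-segment case total.
def segB (data : List (List Int)) (order : List Int) (lo hi : Nat) (t : Option Int) : Int × Int :=
  if hhi : hi - lo = 1 then
    let r := pvRow data (PySem.List.pyGetD order (lo : Int) 0)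
    let nt : Int :=
      match t with
      | none => (PySem.List.slice r none (some (-1))).sum
      | some tv =>
        if PySem.List.pyGetD r 0 0 > tv then (PySem.List.slice r none (some (-1))).sum
        else tv + PySem.List.pyGetD r 1 0
    (nt, nt + PySem.List.pyGetD r 2 0)
  else if hlt : lo < hi then
    let mid := (lo + hi) / 2
    let p1 := segB data order lo mid t
    let p2 := segB data order mid hi (some p1.1)
    (p2.1, max p1.2 p2.2)
  else (0, 0)
termination_by hi - lo
decreasing_by all_goals omega

def cmax_alt (data : List (List Int)) (order : List Int) : Int :=
  (segB data order 0 order.length none).2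

-- ===== PRECONDITION & SPEC =====
-- Pre_ excludes exactly the inputs where the Python A raises: empty order (IndexError on order[0])
-- and any order index whose data row is out of range or shorter than 3 (IndexError on data[i] / data[i][2]).
def Pre_cmax (data : List (List Int)) (order : List Int) : Prop :=
  order ≠ [] ∧ ∀ i ∈ order, PySem.Raise.InRange data.length i ∧ 3 ≤ (PySem.List.pyGetD data i []).length
instance (data : List (List Int)) (order : List Int) : Decidable (Pre_cmax data order) := by unfold Pre_cmax; infer_instance

def pvWitness_cmax : List (List Int) × List Int := ([[0, 2, 5], [1, 3, 4]], [0, 1])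

def Spec_cmax (data : List (List Int)) (order : List Int) (out : Int) : Prop := out = cmax_alt data order
instance (data : List (List Int)) (order : List Int) (out : Int) : Decidable (Spec_cmax data order out) := by unfold Spec_cmax; infer_instance

-- ===== CLAIM (what is proved, stated in full; the proofs are below) =====
def Claim_equal_cmax : Prop := ∀ (data : List (List Int)) (order : List Int), Dom_cmax data order → Pre_cmax data order → Spec_cmax data order (cmax data order)

-- ===== LEMMAS AND PROOFS =====

-- proof-side linear reference: one uniform step threading (time?, best?), used to relate
-- both A's loop and B's divide-and-conquer to the same fold
def cmaxStepB (data : List (List Int)) (s : Option Int × Option Int) (i : Int) : Option Int × Option Int :=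
  let r := pvRow data i
  let t : Int :=
    match s.1 with
    | none => (PySem.List.slice r none (some (-1))).sum
    | some tm =>
      if PySem.List.pyGetD r 0 0 > tm then (PySem.List.slice r none (some (-1))).sum
      else tm + PySem.List.pyGetD r 1 0
  let c := t + PySem.List.pyGetD r 2 0
  let b : Int :=
    match s.2 with
    | none => c
    | some b0 => if c > b0 then c else b0
  (some t, some b)

-- Python max of a list with one more element appended, as a running max
lemma max?_append_singleton (qk : List Int) (b c : Int)
    (h : PySem.List.max? qk (fun x => x) = some b) :
    PySem.List.max? (qk ++ [c]) (fun x => x) = some (if c > b then c else b) := by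
  cases qk with
  | nil => simp [PySem.List.max?] at h
  | cons q0 qs =>
    rw [PySem.List.max?_id_cons] at h
    rw [List.cons_append, PySem.List.max?_id_cons, List.foldl_append]
    simp only [List.foldl_cons, List.foldl_nil]
    injection h with h
    subst h
    congr 1
    rcases le_or_gt c (qs.foldl max q0) with hle | hlt
    · simp [max_eq_left hle, not_lt.mpr hle]
    · simp [max_eq_right (le_of_lt hlt), hlt]

-- loop invariant: from matching states (A: (t, qk), B: (some t, some (max qk))),
-- A's fold and the reference fold stay matched over any remaining order suffix
lemma loop_agree (data : List (List Int)) (rest : List Int) :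
    ∀ (t b : Int) (qk : List Int), PySem.List.max? qk (fun x => x) = some b →
    rest.foldl (cmaxStepB data) (some t, some b)
      = (some (rest.foldl (cmaxStepA data) (t, qk)).1,
         PySem.List.max? ((rest.foldl (cmaxStepA data) (t, qk)).2) (fun x => x)) := by
  induction rest with
  | nil => intro t b qk h; simp [h]
  | cons i rest ih =>
    intro t b qk h
    simp only [List.foldl_cons]
    by_cases hcond : PySem.List.pyGetD (pvRow data i) 0 0 > t
    · have hA : cmaxStepA data (t, qk) i =
          ((PySem.List.slice (pvRow data i) none (some (-1))).sum,
           qk ++ [(PySem.List.slice (pvRow data i) none (some (-1))).sum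
                  + PySem.List.pyGetD (pvRow data i) 2 0]) := by
        simp [cmaxStepA, hcond]
      have hB : cmaxStepB data (some t, some b) i =
          (some ((PySem.List.slice (pvRow data i) none (some (-1))).sum),
           some (if (PySem.List.slice (pvRow data i) none (some (-1))).sum
                    + PySem.List.pyGetD (pvRow data i) 2 0 > b
                 then (PySem.List.slice (pvRow data i) none (some (-1))).sum
                      + PySem.List.pyGetD (pvRow data i) 2 0
                 else b)) := by
        simp [cmaxStepB, hcond]
      rw [hA, hB]
      exact ih _ _ _ (max?_append_singleton qk b _ h)
    · have hA : cmaxStepA data (t, qk) i =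
          (t + PySem.List.pyGetD (pvRow data i) 1 0,
           qk ++ [t + PySem.List.pyGetD (pvRow data i) 1 0
                  + PySem.List.pyGetD (pvRow data i) 2 0]) := by
        simp [cmaxStepA, hcond]
      have hB : cmaxStepB data (some t, some b) i =
          (some (t + PySem.List.pyGetD (pvRow data i) 1 0),
           some (if t + PySem.List.pyGetD (pvRow data i) 1 0
                    + PySem.List.pyGetD (pvRow data i) 2 0 > b
                 then t + PySem.List.pyGetD (pvRow data i) 1 0
                      + PySem.List.pyGetD (pvRow data i) 2 0
                 else b)) := by
        simp [cmaxStepB, hcond]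
      rw [hA, hB]
      exact ih _ _ _ (max?_append_singleton qk b _ h)

-- A equals the reference fold (A's special-cased first element = the fold's (none, none) seed)
lemma A_eq_foldB (data : List (List Int)) (order : List Int) (hne : order ≠ []) :
    cmax data order = ((order.foldl (cmaxStepB data) (none, none)).2).getD 0 := by
  obtain ⟨o0, rest, rfl⟩ := List.exists_cons_of_ne_nil hne
  unfold cmax
  simp only [PySem.List.pyGetD_zero_cons, PySem.List.slice_from_one, List.tail_cons,
    List.foldl_cons]
  have hB0 : cmaxStepB data (none, none) o0 =
      (some ((PySem.List.slice (pvRow data o0) none (some (-1))).sum),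
       some ((PySem.List.slice (pvRow data o0) none (some (-1))).sum
             + PySem.List.pyGetD (pvRow data o0) 2 0)) := by
    simp [cmaxStepB]
  rw [hB0]
  rw [loop_agree data rest _ _
      [(PySem.List.slice (pvRow data o0) none (some (-1))).sum
       + PySem.List.pyGetD (pvRow data o0) 2 0]
      (by rw [PySem.List.max?_id_cons]; simp)]

-- the best component is a running max: starting the reference fold with best = some b
-- only max-combines b into the best obtained from a none seed (time is unaffected)
lemma foldB_best (data : List (List Int)) :
    ∀ (ys : List Int) (tt : Option Int) (b : Int),
    ys.foldl (cmaxStepB data) (tt, some b)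
      = ((ys.foldl (cmaxStepB data) (tt, none)).1,
         match (ys.foldl (cmaxStepB data) (tt, none)).2 with
         | none => some b
         | some b2 => some (max b b2)) := by
  intro ys
  induction ys with
  | nil => intro tt b; rfl
  | cons y ys ih =>
    intro tt b
    simp only [List.foldl_cons]
    set r := pvRow data y with hr
    set t' : Int :=
      match tt with
      | none => (PySem.List.slice r none (some (-1))).sum
      | some tm =>
        if PySem.List.pyGetD r 0 0 > tm then (PySem.List.slice r none (some (-1))).sum
        else tm + PySem.List.pyGetD r 1 0 with ht'
    set c : Int := t' + PySem.List.pyGetD r 2 0 with hc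
    have h1 : cmaxStepB data (tt, some b) y = (some t', some (if c > b then c else b)) := by
      simp [cmaxStepB, ← hr, ← ht', ← hc]
    have h2 : cmaxStepB data (tt, none) y = (some t', some c) := by
      simp [cmaxStepB, ← hr, ← ht', ← hc]
    rw [h1, h2, ih (some t') (if c > b then c else b), ih (some t') c]
    rcases h3 : (ys.foldl (cmaxStepB data) (some t', none)).2 with _ | b2 <;>
      · simp only [Prod.mk.injEq, Option.some.injEq, max_def, true_and]
        split_ifs <;> omega

-- B's divide-and-conquer over a segment equals the reference fold over that segment
lemma segB_eq_fold (data : List (List Int)) (order : List Int) :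
    ∀ (n lo hi : Nat) (t : Option Int), hi - lo = n → lo < hi → hi ≤ order.length →
    ((order.drop lo).take n).foldl (cmaxStepB data) (t, none)
      = (some (segB data order lo hi t).1, some (segB data order lo hi t).2) := by
  intro n
  induction n using Nat.strong_induction_on with
  | _ n ih =>
    intro lo hi t hn hlt hle
    by_cases h1 : hi - lo = 1
    · subst hn
      have hlo : lo < order.length := by omega
      have htake : (order.drop lo).take (hi - lo) = [order[lo]] := by
        rw [h1]
        rw [List.take_one, List.head?_drop]
        simp [List.getElem?_eq_getElem hlo]
      rw [htake]
      have hget : PySem.List.pyGetD order (lo : Int) 0 = order[lo] := by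
        rw [PySem.List.pyGetD_natCast]
        simp [List.getD, List.getElem?_eq_getElem hlo]
      rw [segB, dif_pos h1]
      cases t with
      | none => simp [cmaxStepB, hget]
      | some tv =>
        by_cases hcond : PySem.List.pyGetD (pvRow data order[lo]) 0 0 > tv
        · simp [cmaxStepB, hget, hcond]
        · simp [cmaxStepB, hget, hcond]
    · subst hn
      have h2 : 2 ≤ hi - lo := by omega
      have hb1 : lo < (lo + hi) / 2 := by omega
      have hb2 : (lo + hi) / 2 < hi := by omega
      have hsplit : (order.drop lo).take (hi - lo)
          = (order.drop lo).take ((lo + hi) / 2 - lo) ++ (order.drop ((lo + hi) / 2)).take (hi - (lo + hi) / 2) := by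
        have hsum : hi - lo = ((lo + hi) / 2 - lo) + (hi - (lo + hi) / 2) := by omega
        have hidx : lo + ((lo + hi) / 2 - lo) = (lo + hi) / 2 := by omega
        rw [hsum, List.take_add, List.drop_drop, hidx]
      have hunf : segB data order lo hi t
          = ((segB data order ((lo + hi) / 2) hi (some (segB data order lo ((lo + hi) / 2) t).1)).1,
             max (segB data order lo ((lo + hi) / 2) t).2
                 (segB data order ((lo + hi) / 2) hi (some (segB data order lo ((lo + hi) / 2) t).1)).2) := by
        conv_lhs => rw [segB]
        rw [dif_neg h1, dif_pos hlt]
      rw [hsplit, List.foldl_append,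
          ih ((lo + hi) / 2 - lo) (by omega) lo ((lo + hi) / 2) t rfl hb1 (by omega),
          foldB_best data,
          ih (hi - (lo + hi) / 2) (by omega) ((lo + hi) / 2) hi
            (some (segB data order lo ((lo + hi) / 2) t).1) rfl hb2 hle,
          hunf]

-- ===== VERDICT (by name: the statement is the Claim_ definition above) =====
theorem cmax_spec : Claim_equal_cmax := by
  intro data order _ hpre
  obtain ⟨hne, _⟩ := hpre
  unfold Spec_cmax cmax_alt
  have hlen : 0 < order.length := List.length_pos_iff.mpr hne
  have h := segB_eq_fold data order order.length 0 order.length none (by omega) hlen (le_refl _)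
  rw [List.drop_zero, List.take_length] at h
  rw [A_eq_foldB data order hne, h]
  rfl
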